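-- pv_equiv track=rewrite | github.com/MMAThijssen/catfish | networks/training_encodings.py | extend_classification
-- ===== SOURCE A (Python) =====
-- def extend_classification(classified_seq):
--     """
--     Extends classification to all bases part of homopolymer
--     as opposed to only middle base in 5-mer.
--
--     Args:
--         classified_seq -- list of ints
--     """
--      # go forwards through seq
--     #TODO: adjust width = 4
--     width = 4
--     width_l = width // 2  # if width is even, pick point RIGHT of middle
--     width_r = width - width_l
--     for label in range(len(classified_seq)):
--         if classified_seq[label] == 1:
--             count = 0
--             while count < width_l:
--                 idx = label - width_l + count
--                 if idx >= 0:
--                     classified_seq[idx] = 1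
--                 count += 1
--     # go backwards through seq
--     for label in reversed(range(len(classified_seq))):
--         if classified_seq[label] == 1:
--             count = 0
--             while count < width_r:
--                 idx = label + width_r - count
--                 if idx < len(classified_seq):
--                     classified_seq[idx] = 1
--                 count += 1
--     return(classified_seq)
-- ===== SOURCE B (Python) =====
-- def extend_classification(classified_seq):
--     """
--     Extends classification to all bases part of homopolymer
--     as opposed to only middle base in 5-mer.
--
--     Args:
--         classified_seq -- list of ints
--     """
--     width = 4
--     width_l = width // 2
--     width_r = width - width_l
--     n = len(classified_seq)
--     ones = [i for i, v in enumerate(classified_seq) if v == 1]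
--     for i in ones:
--         for idx in range(max(0, i - width_l), min(n, i + width_r + 1)):
--             classified_seq[idx] = 1
--     return classified_seq
-- ===== Notes on version B (the rewrite author's own statement) =====
-- stated objective: simpler
-- what changed: Replaced the two directional passes (forward setting label-2..label-1, backward setting label+1..label+2, the second reading the first's writes) by one pass: snapshot the indices of original 1s, then paint a single clamped symmetric window i-2..i+2 around each.
import Mathlib
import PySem

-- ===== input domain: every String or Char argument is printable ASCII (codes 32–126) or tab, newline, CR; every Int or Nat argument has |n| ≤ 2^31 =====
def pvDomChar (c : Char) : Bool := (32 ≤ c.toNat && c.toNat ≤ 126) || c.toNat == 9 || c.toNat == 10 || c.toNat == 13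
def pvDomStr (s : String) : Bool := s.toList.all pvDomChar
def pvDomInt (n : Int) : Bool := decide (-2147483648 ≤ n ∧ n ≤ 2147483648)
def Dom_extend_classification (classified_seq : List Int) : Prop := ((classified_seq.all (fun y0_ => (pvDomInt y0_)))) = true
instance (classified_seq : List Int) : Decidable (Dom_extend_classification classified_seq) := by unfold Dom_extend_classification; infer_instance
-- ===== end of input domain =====

-- B replaces A's two directional half-window passes by one pass painting a symmetric
-- clamped window around each originally-1 position (objective: simpler). Both Pythons
-- mutate the argument list in place and return it; the theorems are about the return value.

-- ===== PORT A =====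
-- inner while-loop of the forward pass: while count < width_l: idx = label-width_l+count; if idx>=0: s[idx]=1
def ecWhileL (width_l : Int) (label : Nat) (count : Int) (s : List Int) : List Int :=
  if _h : count < width_l then
    let idx : Int := (label : Int) - width_l + count
    let s' := if idx ≥ 0 then s.set idx.toNat 1 else s
    ecWhileL width_l label (count + 1) s'
  else s
termination_by (width_l - count).toNat
decreasing_by omega

-- inner while-loop of the backward pass: while count < width_r: idx = label+width_r-count; if idx<len: s[idx]=1
-- (idx is positive whenever count < width_r = 2, so `.toNat` after the bound check is exact)
def ecWhileR (width_r : Int) (n : Nat) (label : Nat) (count : Int) (s : List Int) : List Int :=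
  if _h : count < width_r then
    let idx : Int := (label : Int) + width_r - count
    let s' := if idx < (n : Int) then s.set idx.toNat 1 else s
    ecWhileR width_r n label (count + 1) s'
  else s
termination_by (width_r - count).toNat
decreasing_by omega

def extend_classification (classified_seq : List Int) : List Int :=
  let width : Int := 4
  let width_l : Int := PySem.Int.floordiv width 2
  let width_r : Int := width - width_l
  -- go forwards through seq
  let s1 := (List.range classified_seq.length).foldl
      (fun s label => if s.getD label 0 == 1 then ecWhileL width_l label 0 s else s)
      classified_seq
  -- go backwards through seq (len(classified_seq) is unchanged by the writes: = s1.length)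
  (List.range s1.length).reverse.foldl
      (fun s label => if s.getD label 0 == 1 then ecWhileR width_r s1.length label 0 s else s)
      s1

-- ===== PORT B =====
def extend_classification_alt (classified_seq : List Int) : List Int :=
  let width : Int := 4
  let width_l : Int := PySem.Int.floordiv width 2
  let width_r : Int := width - width_l
  let n : Int := (classified_seq.length : Int)
  -- ones = [i for i, v in enumerate(classified_seq) if v == 1]
  let ones : List Int := (PySem.List.enumerate classified_seq).filterMap
      (fun p => if p.2 == 1 then some p.1 else none)
  ones.foldl
    (fun s i =>
      (PySem.List.pyRange (max 0 (i - width_l)) (min n (i + width_r + 1)) 1).foldl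
        (fun t idx => t.set idx.toNat 1) s)
    classified_seq

-- ===== PRECONDITION & SPEC =====
def Spec_extend_classification (classified_seq : List Int) (out : List Int) : Prop := out = extend_classification_alt classified_seq
instance (classified_seq : List Int) (out : List Int) : Decidable (Spec_extend_classification classified_seq out) := by unfold Spec_extend_classification; infer_instance

-- ===== CLAIM (what is proved, stated in full; the proofs are below) =====
def Claim_equal_extend_classification : Prop := ∀ (classified_seq : List Int), Dom_extend_classification classified_seq → Spec_extend_classification classified_seq (extend_classification classified_seq)

-- ===== LEMMAS AND PROOFS =====

theorem ecWhileL_length (width_l : Int) (label : Nat) (count : Int) (s : List Int) :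
    (ecWhileL width_l label count s).length = s.length := by
  fun_induction ecWhileL with
  | case1 cnt st hc idx s' ih =>
      rw [ih]; simp only [s', idx]; split <;> simp
  | case2 => rfl

theorem ecWhileR_length (width_r : Int) (n : Nat) (label : Nat) (count : Int) (s : List Int) :
    (ecWhileR width_r n label count s).length = s.length := by
  fun_induction ecWhileR with
  | case1 cnt st hc idx s' ih =>
      rw [ih]; simp only [s', idx]; split <;> simp
  | case2 => rfl

theorem ecWhileL_two (label : Nat) (s : List Int) (j : Nat) :
    (ecWhileL 2 label 0 s)[j]? =
      if (j + 1 = label ∨ j + 2 = label) ∧ j < s.length then some 1 else s[j]? := by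
  rw [ecWhileL]; norm_num
  rw [ecWhileL]; norm_num
  rw [ecWhileL]; norm_num
  match label with
  | 0 => norm_num
  | 1 =>
      norm_num
      simp only [List.getElem?_set]
      split_ifs <;> simp_all
  | (l+2) =>
      have h1 : ((l:Int) + 2 - 2 + 0 : Int) = (l:Nat) := by omega
      have h2 : ((l:Int) + 2 - 2 + 1 : Int) = ((l+1:Nat) : Int) := by omega
      norm_num [h1, h2]
      rw [if_pos (by positivity : (0:Int) ≤ (l:Int) + 1)]
      simp only [List.getElem?_set, List.length_set]
      split_ifs <;> simp_all <;> omega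

theorem ecWhileR_two (n : Nat) (label : Nat) (s : List Int) (hn : s.length = n) (j : Nat) :
    (ecWhileR 2 n label 0 s)[j]? =
      if (j = label + 1 ∨ j = label + 2) ∧ j < n then some 1 else s[j]? := by
  rw [ecWhileR]; norm_num
  rw [ecWhileR]; norm_num
  rw [ecWhileR]; norm_num
  have h1 : ((label:Int) + 2).toNat = label + 2 := by omega
  rw [h1]
  by_cases c2 : (label:Int) + 2 < (n:Int)
  · rw [if_pos (le_of_lt c2), if_pos c2]
    simp only [List.getElem?_set, List.length_set, hn]
    split_ifs <;> first | rfl | (exfalso; omega)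
  · by_cases c1 : (label:Int) + 2 ≤ (n:Int)
    · rw [if_pos c1, if_neg c2]
      simp only [List.getElem?_set, hn]
      split_ifs <;> first | rfl | (exfalso; omega)
    · rw [if_neg c1, if_neg c2]
      split_ifs <;> first | rfl | (exfalso; omega)

theorem fwd_len (orig : List Int) (m : Nat) :
    ((List.range m).foldl
        (fun s label => if s.getD label 0 == 1 then ecWhileL 2 label 0 s else s)
        orig).length = orig.length := by
  induction m with
  | zero => rfl
  | succ m ih =>
      rw [List.range_succ, List.foldl_append, List.foldl_cons, List.foldl_nil]
      split
      · rw [ecWhileL_length, ih]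
      · exact ih

theorem fwd_go (orig : List Int) (m : Nat) (j : Nat) :
    ((List.range m).foldl
        (fun s label => if s.getD label 0 == 1 then ecWhileL 2 label 0 s else s)
        orig)[j]? =
      if ∃ l < m, orig.getD l 0 = 1 ∧ (j + 1 = l ∨ j + 2 = l) then some 1
      else orig[j]? := by
  induction m generalizing j with
  | zero =>
      rw [if_neg]; · rfl
      rintro ⟨l, hl, -⟩; omega
  | succ m ih =>
      rw [List.range_succ, List.foldl_append, List.foldl_cons, List.foldl_nil]
      have hread : (((List.range m).foldl
          (fun s label => if s.getD label 0 == 1 then ecWhileL 2 label 0 s else s)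
          orig)).getD m 0 = orig.getD m 0 := by
        rw [List.getD_eq_getElem?_getD, ih m, List.getD_eq_getElem?_getD]
        rw [if_neg]
        rintro ⟨l, hl, -, h⟩; omega
      by_cases horig : orig.getD m 0 = 1
      · rw [if_pos (by rw [beq_iff_eq, hread]; exact horig)]
        have hm : m < orig.length := by
          by_contra hc
          rw [List.getD_eq_default _ _ (by omega)] at horig
          exact one_ne_zero horig.symm
        rw [ecWhileL_two, ih j, fwd_len]
        by_cases hA : (j + 1 = m ∨ j + 2 = m) ∧ j < orig.length
        · rw [if_pos hA, if_pos ⟨m, by omega, horig, by omega⟩]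
        · rw [if_neg hA]
          by_cases hB : ∃ l < m, orig.getD l 0 = 1 ∧ (j + 1 = l ∨ j + 2 = l)
          · obtain ⟨l, hl, hP, hj⟩ := hB
            rw [if_pos ⟨l, hl, hP, hj⟩, if_pos ⟨l, by omega, hP, hj⟩]
          · rw [if_neg hB, if_neg]
            rintro ⟨l, hl, hP, hj⟩
            rcases Nat.lt_succ_iff_lt_or_eq.mp hl with h | h
            · exact hB ⟨l, h, hP, hj⟩
            · subst h; exact hA ⟨hj, by omega⟩
      · rw [if_neg (by rw [beq_iff_eq, hread]; exact horig)]
        rw [ih j]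
        by_cases hB : ∃ l < m, orig.getD l 0 = 1 ∧ (j + 1 = l ∨ j + 2 = l)
        · obtain ⟨l, hl, hP, hj⟩ := hB
          rw [if_pos ⟨l, hl, hP, hj⟩, if_pos ⟨l, by omega, hP, hj⟩]
        · rw [if_neg hB, if_neg]
          rintro ⟨l, hl, hP, hj⟩
          rcases Nat.lt_succ_iff_lt_or_eq.mp hl with h | h
          · exact hB ⟨l, h, hP, hj⟩
          · subst h; exact horig hP

theorem bwd_go (N : Nat) (m : Nat) (t : List Int) (hm : m ≤ N) (ht : t.length = N) (j : Nat) :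
    ((List.range m).reverse.foldl
        (fun s label => if s.getD label 0 == 1 then ecWhileR 2 N label 0 s else s)
        t)[j]? =
      if ∃ l < m, t.getD l 0 = 1 ∧ (j = l + 1 ∨ j = l + 2) ∧ j < N then some 1
      else t[j]? := by
  induction m generalizing t j with
  | zero =>
      rw [if_neg]; · rfl
      rintro ⟨l, hl, -⟩; omega
  | succ m ih =>
      rw [List.range_succ, List.reverse_append, List.reverse_singleton, List.singleton_append, List.foldl_cons]
      by_cases horig : t.getD m 0 = 1
      · rw [if_pos (by rw [beq_iff_eq]; exact horig)]
        have ht' : (ecWhileR 2 N m 0 t).length = N := by rw [ecWhileR_length]; exact ht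
        have hgetD : ∀ l, l < m → (ecWhileR 2 N m 0 t).getD l 0 = t.getD l 0 := by
          intro l hl
          rw [List.getD_eq_getElem?_getD, ecWhileR_two N m t ht l,
            if_neg (by rintro ⟨h, -⟩; omega), ← List.getD_eq_getElem?_getD]
        rw [ih (ecWhileR 2 N m 0 t) (by omega) ht' j]
        by_cases hB : ∃ l < m, t.getD l 0 = 1 ∧ (j = l + 1 ∨ j = l + 2) ∧ j < N
        · obtain ⟨l, hl, hP, hj⟩ := hB
          rw [if_pos ⟨l, hl, by rw [hgetD l hl]; exact hP, hj⟩,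
            if_pos ⟨l, by omega, hP, hj⟩]
        · rw [if_neg (by rintro ⟨l, hl, hP, hj⟩; exact hB ⟨l, hl, by rw [← hgetD l hl]; exact hP, hj⟩)]
          rw [ecWhileR_two N m t ht j]
          by_cases hA : (j = m + 1 ∨ j = m + 2) ∧ j < N
          · rw [if_pos hA, if_pos ⟨m, by omega, horig, hA⟩]
          · rw [if_neg hA, if_neg]
            rintro ⟨l, hl, hP, hj⟩
            rcases Nat.lt_succ_iff_lt_or_eq.mp hl with h | h
            · exact hB ⟨l, h, hP, hj⟩
            · subst h; exact hA hj
      · rw [if_neg (by rw [beq_iff_eq]; exact horig)]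
        rw [ih t (by omega) ht j]
        by_cases hB : ∃ l < m, t.getD l 0 = 1 ∧ (j = l + 1 ∨ j = l + 2) ∧ j < N
        · obtain ⟨l, hl, hP, hj⟩ := hB
          rw [if_pos ⟨l, hl, hP, hj⟩, if_pos ⟨l, by omega, hP, hj⟩]
        · rw [if_neg hB, if_neg]
          rintro ⟨l, hl, hP, hj⟩
          rcases Nat.lt_succ_iff_lt_or_eq.mp hl with h | h
          · exact hB ⟨l, h, hP, hj⟩
          · subst h; exact horig hP

theorem win_len (L : List Int) (t : List Int) :
    (L.foldl (fun u idx => u.set idx.toNat 1) t).length = t.length := by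
  induction L generalizing t with
  | nil => rfl
  | cons x L ih => rw [List.foldl_cons, ih, List.length_set]

theorem win_one (n : Nat) (k : Nat) : ∀ (a b : Int) (t : List Int), 0 ≤ a → b ≤ (n:Int) →
    t.length = n → (b - a).toNat = k → ∀ j : Nat,
    ((PySem.List.pyRange a b 1).foldl (fun u idx => u.set idx.toNat 1) t)[j]? =
      if a ≤ (j:Int) ∧ (j:Int) < b then some 1 else t[j]? := by
  induction k with
  | zero =>
      intro a b t ha hb ht hk j
      rw [PySem.List.pyRange_one_eq_nil (by omega), List.foldl_nil, if_neg (by omega)]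
  | succ k ih =>
      intro a b t ha hb ht hk j
      rw [PySem.List.pyRange_one_cons (by omega), List.foldl_cons]
      rw [ih (a+1) b (t.set a.toNat 1) (by omega) hb (by rw [List.length_set]; exact ht) (by omega) j]
      rw [List.getElem?_set]
      split_ifs <;> first | rfl | (exfalso; omega)

theorem ones_fold (n : Nat) (L : List Int) : ∀ (t : List Int), t.length = n → ∀ j : Nat,
    (L.foldl
        (fun s i =>
          (PySem.List.pyRange (max 0 (i - 2)) (min (n:Int) (i + 2 + 1)) 1).foldl
            (fun u idx => u.set idx.toNat 1) s)
        t)[j]? =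
      if ∃ i ∈ L, max 0 (i - 2) ≤ (j:Int) ∧ (j:Int) < min (n:Int) (i + 2 + 1) then some 1
      else t[j]? := by
  induction L with
  | nil =>
      intro t ht j
      rw [List.foldl_nil, if_neg (by rintro ⟨i, hi, -⟩; exact (List.not_mem_nil hi))]
  | cons x L ih =>
      intro t ht j
      rw [List.foldl_cons]
      have ht' : ((PySem.List.pyRange (max 0 (x - 2)) (min (n:Int) (x + 2 + 1)) 1).foldl
          (fun u idx => u.set idx.toNat 1) t).length = n := by rw [win_len]; exact ht
      rw [ih _ ht' j]
      rw [win_one n ((min (n:Int) (x + 2 + 1)) - max 0 (x - 2)).toNat (max 0 (x - 2))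
          (min (n:Int) (x + 2 + 1)) t (le_max_left 0 _) (min_le_left _ _) ht rfl j]
      by_cases hL : ∃ i ∈ L, max 0 (i - 2) ≤ (j:Int) ∧ (j:Int) < min (n:Int) (i + 2 + 1)
      · obtain ⟨i, hi, hw⟩ := hL
        rw [if_pos ⟨i, hi, hw⟩, if_pos ⟨i, List.mem_cons_of_mem x hi, hw⟩]
      · rw [if_neg hL]
        by_cases hx : max 0 (x - 2) ≤ (j:Int) ∧ (j:Int) < min (n:Int) (x + 2 + 1)
        · rw [if_pos hx, if_pos ⟨x, List.mem_cons_self, hx⟩]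
        · rw [if_neg hx, if_neg]
          rintro ⟨i, hi, hw⟩
          rcases List.mem_cons.mp hi with h | h
          · subst h; exact hx hw
          · exact hL ⟨i, h, hw⟩

theorem mem_ones (orig : List Int) (i : Int) :
    (i ∈ (PySem.List.enumerate orig).filterMap
        (fun p => if p.2 == 1 then some p.1 else none)) ↔
      ∃ k < orig.length, orig.getD k 0 = 1 ∧ i = (k:Int) := by
  rw [List.mem_filterMap]
  constructor
  · rintro ⟨p, hp, hf⟩
    rw [PySem.List.mem_enumerate_iff] at hp
    obtain ⟨k, hk, rfl⟩ := hp
    by_cases h1 : orig[k] = 1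
    · refine ⟨k, hk, by rw [List.getD_eq_getElem _ _ hk]; exact h1, ?_⟩
      rw [if_pos (by simpa using h1)] at hf
      simpa using hf.symm
    · rw [if_neg (by simpa using h1)] at hf
      exact absurd hf (by simp)
  · rintro ⟨k, hk, h1, rfl⟩
    refine ⟨(0 + (k:Int), orig[k]), ?_, ?_⟩
    · rw [PySem.List.mem_enumerate_iff]; exact ⟨k, hk, rfl⟩
    · rw [List.getD_eq_getElem _ _ hk] at h1
      rw [if_pos (by simpa using h1)]
      simp

theorem cond_bridge (orig s1 : List Int)
    (hs1 : ∀ x : Nat, s1[x]? =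
      if ∃ l < orig.length, orig.getD l 0 = 1 ∧ (x + 1 = l ∨ x + 2 = l) then some 1
      else orig[x]?) (x : Nat) :
    s1.getD x 0 = 1 ↔
      ((∃ l < orig.length, orig.getD l 0 = 1 ∧ (x + 1 = l ∨ x + 2 = l)) ∨ orig.getD x 0 = 1) := by
  rw [List.getD_eq_getElem?_getD, hs1 x]
  split_ifs with h
  · exact iff_of_true rfl (Or.inl h)
  · rw [← List.getD_eq_getElem?_getD]
    exact ⟨Or.inr, fun hc => hc.resolve_left h⟩

theorem extend_main (orig : List Int) :
    extend_classification orig = extend_classification_alt orig := by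
  have hfd : PySem.Int.floordiv 4 2 = 2 := by decide
  have h42 : (4:Int) - 2 = 2 := by norm_num
  apply List.ext_getElem?
  intro j
  simp only [extend_classification, extend_classification_alt, hfd, h42, fwd_len]
  rw [bwd_go orig.length orig.length _ le_rfl (fwd_len orig orig.length) j]
  rw [ones_fold orig.length _ orig rfl j]
  have hs1 : ∀ x : Nat, ((List.range orig.length).foldl
      (fun s label => if s.getD label 0 == 1 then ecWhileL 2 label 0 s else s) orig)[x]? =
      if ∃ l < orig.length, orig.getD l 0 = 1 ∧ (x + 1 = l ∨ x + 2 = l) then some 1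
      else orig[x]? := fun x => fwd_go orig orig.length x
  rw [if_congr (exists_congr fun l => and_congr_right fun _ =>
      and_congr_left fun _ => cond_bridge orig _ hs1 l) rfl rfl]
  rw [hs1 j]
  set n := orig.length with hn
  by_cases hB : ∃ i ∈ (PySem.List.enumerate orig).filterMap
      (fun p => if p.2 == 1 then some p.1 else none),
      max 0 (i - 2) ≤ (j:Int) ∧ (j:Int) < min (n:Int) (i + 2 + 1)
  · rw [if_pos hB]
    obtain ⟨i, hi, hw⟩ := hB
    rw [mem_ones] at hi
    obtain ⟨k, hk, hP, rfl⟩ := hi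
    by_cases hA1 : ∃ l < n, ((∃ l₂ < n, orig.getD l₂ 0 = 1 ∧ (l + 1 = l₂ ∨ l + 2 = l₂)) ∨
        orig.getD l 0 = 1) ∧ (j = l + 1 ∨ j = l + 2) ∧ j < n
    · rw [if_pos hA1]
    · rw [if_neg hA1]
      by_cases hF : ∃ l < n, orig.getD l 0 = 1 ∧ (j + 1 = l ∨ j + 2 = l)
      · rw [if_pos hF]
      · rw [if_neg hF]
        -- the witness k must be j itself
        have hkj : k = j := by
          by_contra hne
          rcases Nat.lt_or_ge k j with h | h
          · -- k < j : j = k+1 or k+2 covered by the backward condition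
            exact hA1 ⟨k, hk, Or.inr hP, by omega, by omega⟩
          · -- k > j : covered by the forward condition
            exact hF ⟨k, hk, hP, by omega⟩
        subst hkj
        rw [List.getElem?_eq_getElem hk, List.getD_eq_getElem _ _ hk] at *
        rw [hP]
  · rw [if_neg hB]
    rw [if_neg, if_neg]
    · -- forward condition would imply the window condition
      rintro ⟨l, hl, hP, hj⟩
      exact hB ⟨(l:Int), (mem_ones orig _).mpr ⟨l, hl, hP, rfl⟩, by omega, by omega⟩
    · -- backward condition would imply the window condition
      rintro ⟨l, hl, hQ, hj, hjn⟩
      rcases hQ with ⟨l₂, hl₂, hP₂, hll⟩ | hP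
      · exact hB ⟨(l₂:Int), (mem_ones orig _).mpr ⟨l₂, hl₂, hP₂, rfl⟩, by omega, by omega⟩
      · exact hB ⟨(l:Int), (mem_ones orig _).mpr ⟨l, hl, hP, rfl⟩, by omega, by omega⟩

-- ===== VERDICT (by name: the statement is the Claim_ definition above) =====
theorem extend_classification_spec : Claim_equal_extend_classification := by
  intro s _
  show _ = _
  exact extend_main s
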